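-- pv_equiv track=rewrite | github.com/kabobik/LSwitch | lswitch/layout_compatibility.py | find_compatible_layout
-- ===== SOURCE A (Python) =====
-- LAYOUT_GROUPS = {
--     'latin': ['us', 'en', 'es', 'de', 'fr', 'it', 'pt', 'pl', 'nl', 'se', 'fi', 'no', 'dk', 'cz', 'sk', 'hr', 'ro', 'hu'],
--     'cyrillic': ['ru', 'ua', 'by', 'bg', 'sr', 'mk', 'kz'],
--     'arabic': ['ar', 'fa', 'ur'],
--     'greek': ['gr', 'el'],
--     'hebrew': ['il', 'he'],
--     'cjk': ['zh', 'ja', 'ko'],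
--     'thai': ['th'],
--     'vietnamese': ['vn'],
-- }
--
-- LAYOUT_ALIASES = {
--     'us': 'en',
--     'uk': 'ua',  # Ukrainian
--     'gb': 'en',  # British English -> en
-- }
--
-- def normalize_layout_name(name: str) -> str:
--     """Normalize layout name to canonical form.
--
--     Args:
--         name: Layout name (e.g., 'us', 'US', 'en')
--
--     Returns:
--         Normalized lowercase layout name
--     """
--     normalized = name.lower().strip()
--     return LAYOUT_ALIASES.get(normalized, normalized)
--
-- def find_compatible_layout(target: str, available: list) -> str | None:
--     """Find a compatible layout from the available list.
--
--     First tries to find an exact match (after normalization), then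
--     searches for any layout from the same compatibility group.
--
--     Args:
--         target: Target layout name (e.g., 'us', 'en', 'ru')
--         available: List of available layouts in the system
--
--     Returns:
--         Compatible layout name from available list, or None if not found
--
--     Examples:
--         >>> find_compatible_layout('us', ['en', 'ru'])
--         'en'
--         >>> find_compatible_layout('es', ['en', 'ru'])
--         'en'  # Both in 'latin' group
--         >>> find_compatible_layout('ru', ['en', 'ua'])
--         'ua'  # Both in 'cyrillic' group
--         >>> find_compatible_layout('zh', ['en', 'ru'])
--         None  # No compatible layout
--     """
--     normalized_target = normalize_layout_name(target)
--     available_normalized = [normalize_layout_name(l) for l in available]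
--
--     # Direct match (after normalization)
--     if normalized_target in available_normalized:
--         # Return the original name from available list
--         idx = available_normalized.index(normalized_target)
--         return available[idx]
--
--     # Search in compatibility groups
--     for group_name, layouts in LAYOUT_GROUPS.items():
--         if normalized_target in layouts:
--             # Target is in this group - find any available layout from same group
--             for layout in layouts:
--                 if layout in available_normalized:
--                     idx = available_normalized.index(layout)
--                     return available[idx]
--
--     return None
-- ===== SOURCE B (Python) =====
-- LAYOUT_GROUPS = {
--     'latin': ['us', 'en', 'es', 'de', 'fr', 'it', 'pt', 'pl', 'nl', 'se', 'fi', 'no', 'dk', 'cz', 'sk', 'hr', 'ro', 'hu'],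
--     'cyrillic': ['ru', 'ua', 'by', 'bg', 'sr', 'mk', 'kz'],
--     'arabic': ['ar', 'fa', 'ur'],
--     'greek': ['gr', 'el'],
--     'hebrew': ['il', 'he'],
--     'cjk': ['zh', 'ja', 'ko'],
--     'thai': ['th'],
--     'vietnamese': ['vn'],
-- }
--
-- LAYOUT_ALIASES = {
--     'us': 'en',
--     'uk': 'ua',
--     'gb': 'en',
-- }
--
-- def normalize_layout_name(name: str) -> str:
--     normalized = name.lower().strip()
--     return LAYOUT_ALIASES.get(normalized, normalized)
--
-- def find_compatible_layout(target: str, available: list) -> str | None: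
--     t = normalize_layout_name(target)
--     group = next((ls for ls in LAYOUT_GROUPS.values() if t in ls), [])
--
--     def rank(n):
--         # priority: 0 = exact target, 1+k = k-th member of the target's group
--         if n == t:
--             return 0
--         try:
--             return 1 + group.index(n)
--         except ValueError:
--             return None
--
--     # single pass over `available`, keeping the element of smallest rank
--     # (strict '<' keeps the earliest occurrence on equal rank)
--     best = None
--     for name in available:
--         r = rank(normalize_layout_name(name))
--         if r is not None and (best is None or r < best[0]):
--             best = (r, name)
--     return best[1] if best is not None else None
-- ===== Notes on version B (the rewrite author's own statement) =====
-- stated objective: alternative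
-- what changed: Inverts the loop structure: instead of A's two-phase candidate search over the normalized-available list (direct-match branch, then nested group loops with repeated membership tests and list.index scans), B makes one pass over `available`, scoring each element by a rank (0 for the target, 1+position in the target's group) and keeping the first element of minimal rank.
import Mathlib
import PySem

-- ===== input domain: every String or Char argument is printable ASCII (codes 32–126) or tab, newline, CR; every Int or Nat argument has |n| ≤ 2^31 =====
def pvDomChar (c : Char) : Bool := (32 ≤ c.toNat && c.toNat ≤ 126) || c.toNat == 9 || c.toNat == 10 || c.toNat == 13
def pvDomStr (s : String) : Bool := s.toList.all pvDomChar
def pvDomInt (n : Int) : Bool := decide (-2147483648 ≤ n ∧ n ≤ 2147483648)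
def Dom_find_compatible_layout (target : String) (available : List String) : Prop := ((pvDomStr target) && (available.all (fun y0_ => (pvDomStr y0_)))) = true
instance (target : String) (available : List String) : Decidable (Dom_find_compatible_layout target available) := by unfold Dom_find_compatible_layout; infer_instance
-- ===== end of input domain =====

-- B inverts the loop structure: one pass over `available` keeping the first element of
-- minimal rank (0 = target, 1+k = k-th member of the target's group), instead of A's
-- two-phase candidate search with repeated membership/.index scans (objective: alternative).

-- ===== PORT A =====
def LAYOUT_GROUPS : List (String × List String) := [
  ("latin", ["us", "en", "es", "de", "fr", "it", "pt", "pl", "nl", "se", "fi", "no", "dk", "cz", "sk", "hr", "ro", "hu"]),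
  ("cyrillic", ["ru", "ua", "by", "bg", "sr", "mk", "kz"]),
  ("arabic", ["ar", "fa", "ur"]),
  ("greek", ["gr", "el"]),
  ("hebrew", ["il", "he"]),
  ("cjk", ["zh", "ja", "ko"]),
  ("thai", ["th"]),
  ("vietnamese", ["vn"])]

def LAYOUT_ALIASES : PySem.Dict String String :=
  PySem.Dict.ofList [("us", "en"), ("uk", "ua"), ("gb", "en")]

def normalize_layout_name (name : String) : String :=
  let normalized := PySem.Str.strip (PySem.Str.lower name)
  LAYOUT_ALIASES.getD normalized normalized

-- inner loop of A: `for layout in layouts: if layout in available_normalized: return available[idx]`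
def pyA_inGroup (layouts : List String) (an : List String) (available : List String) : Option String :=
  match layouts with
  | [] => none
  | l :: rest =>
    if an.contains l then
      match PySem.List.index? an l with
      | some i => available[i]?
      | none => none
    else pyA_inGroup rest an available

-- outer loop of A over LAYOUT_GROUPS.items()
def pyA_groups (gs : List (String × List String)) (nt : String) (an : List String) (available : List String) : Option String :=
  match gs with
  | [] => none
  | g :: rest =>
    if g.2.contains nt then
      match pyA_inGroup g.2 an available with
      | some r => some r
      | none => pyA_groups rest nt an available
    else pyA_groups rest nt an available

def find_compatible_layout (target : String) (available : List String) : Option String :=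
  let nt := normalize_layout_name target
  let an := available.map normalize_layout_name
  if an.contains nt then
    match PySem.List.index? an nt with
    | some i => available[i]?
    | none => none
  else
    pyA_groups LAYOUT_GROUPS nt an available

-- ===== PORT B =====
-- `group = next((ls for ls in LAYOUT_GROUPS.values() if t in ls), [])`
def pvB_group (t : String) : List String :=
  match LAYOUT_GROUPS.find? (fun g => g.2.contains t) with
  | some g => g.2
  | none => []

-- `rank(n)` of Source B: 0 for the target, 1 + position in the group, else None
def pvB_rank (t : String) (g : List String) (n : String) : Option Nat :=
  if n = t then some 0 else (PySem.List.index? g n).map (· + 1)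

-- one step of Source B's for-loop: keep the accumulator unless this name ranks strictly better
def pvB_step (t : String) (g : List String) (acc : Option (Nat × String)) (name : String) :
    Option (Nat × String) :=
  match pvB_rank t g (normalize_layout_name name) with
  | none => acc
  | some r =>
    match acc with
    | none => some (r, name)
    | some (rb, _) => if r < rb then some (r, name) else acc

def find_compatible_layout_alt (target : String) (available : List String) : Option String :=
  let t := normalize_layout_name target
  let g := pvB_group t
  match available.foldl (pvB_step t g) none with
  | some (_, x) => some x
  | none => none

-- ===== PRECONDITION & SPEC =====
def Spec_find_compatible_layout (target : String) (available : List String) (out : Option String) : Prop := out = find_compatible_layout_alt target available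
instance (target : String) (available : List String) (out : Option String) : Decidable (Spec_find_compatible_layout target available out) := by unfold Spec_find_compatible_layout; infer_instance

-- ===== CLAIM (what is proved, stated in full; the proofs are below) =====
def Claim_equal_find_compatible_layout : Prop := ∀ (target : String) (available : List String), Dom_find_compatible_layout target available → Spec_find_compatible_layout target available (find_compatible_layout target available)

-- ===== LEMMAS AND PROOFS =====

-- common characterization: first candidate (target, then its group) present in the
-- normalized list, returned as the original spelling at its first index
def pvCandScan (cands an available : List String) : Option String :=
  match cands.find? (fun c => an.contains c) with
  | some c => (PySem.List.index? an c).bind (fun i => available[i]?)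
  | none => none

-- A's inner loop is a candidate scan over the group's layouts
lemma pyA_inGroup_eq_candScan (layouts an available : List String) :
    pyA_inGroup layouts an available = pvCandScan layouts an available := by
  induction layouts with
  | nil => rfl
  | cons l rest ih =>
    rw [pyA_inGroup, pvCandScan]
    by_cases hc : an.contains l = true
    · rw [if_pos hc, List.find?_cons_of_pos (by simpa using hc)]
      show _ = (PySem.List.index? an l).bind fun i => available[i]?
      cases h : PySem.List.index? an l with
      | none => rfl
      | some i => rfl
    · rw [if_neg hc, List.find?_cons_of_neg (by simpa using hc), ih, pvCandScan]

-- if no group in gs contains nt, A's outer loop returns none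
lemma pyA_groups_none (gs : List (String × List String)) (nt : String)
    (an available : List String) (h : ∀ g ∈ gs, g.2.contains nt = false) :
    pyA_groups gs nt an available = none := by
  induction gs with
  | nil => rfl
  | cons g rest ih =>
    rw [pyA_groups, if_neg (ne_true_of_eq_false (h g (by simp)))]
    exact ih (fun g' hg' => h g' (List.mem_cons_of_mem _ hg'))

-- with pairwise-disjoint groups, A's outer loop is the inner loop of the first group containing nt
lemma pyA_groups_eq_find (gs : List (String × List String)) (nt : String)
    (an available : List String)
    (hdisj : gs.Pairwise (fun g h => ∀ x ∈ g.2, h.2.contains x = false)) :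
    pyA_groups gs nt an available =
      match gs.find? (fun g => g.2.contains nt) with
      | some g => pyA_inGroup g.2 an available
      | none => none := by
  induction gs with
  | nil => rfl
  | cons g rest ih =>
    rcases List.pairwise_cons.mp hdisj with ⟨hhead, htail⟩
    rw [pyA_groups]
    by_cases hc : g.2.contains nt = true
    · have hm : nt ∈ g.2 := by simpa using hc
      rw [if_pos hc, List.find?_cons_of_pos (by simpa using hc)]
      cases hin : pyA_inGroup g.2 an available with
      | some r => simp [hin]
      | none =>
        have hnone : pyA_groups rest nt an available = none :=
          pyA_groups_none rest nt an available (fun h hh => hhead h hh nt hm)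
        simp [hnone, hin]
    · rw [if_neg hc, List.find?_cons_of_neg (by simpa using hc)]
      exact ih htail

lemma groups_disjoint :
    LAYOUT_GROUPS.Pairwise (fun g h => ∀ x ∈ g.2, h.2.contains x = false) := by
  decide

-- A equals the candidate scan over (target :: target's group)
lemma A_eq_candScan (target : String) (available : List String) :
    find_compatible_layout target available =
      pvCandScan (normalize_layout_name target :: pvB_group (normalize_layout_name target))
        (available.map normalize_layout_name) available := by
  unfold find_compatible_layout
  set nt := normalize_layout_name target
  set an := available.map normalize_layout_name
  by_cases hc : an.contains nt = true
  · rw [if_pos hc, pvCandScan, List.find?_cons_of_pos (by simpa using hc)]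
    show _ = (PySem.List.index? an nt).bind fun i => available[i]?
    cases h : PySem.List.index? an nt with
    | none => rfl
    | some i => rfl
  · rw [if_neg hc, pvCandScan, List.find?_cons_of_neg (by simpa using hc)]
    rw [pyA_groups_eq_find _ _ _ _ groups_disjoint, pvB_group]
    cases LAYOUT_GROUPS.find? (fun g => g.2.contains nt) with
    | none => rfl
    | some g => exact pyA_inGroup_eq_candScan g.2 an available

-- Source B's rank is the first index in the candidate list (target :: group)
lemma rank_eq_index (t : String) (g : List String) (n : String) :
    pvB_rank t g n = PySem.List.index? (t :: g) n := by
  unfold pvB_rank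
  by_cases h : n = t
  · subst h; rw [PySem.List.index?_cons_self, if_pos rfl]
  · rw [if_neg h, PySem.List.index?_cons_of_ne _ (fun he => h he.symm)]

-- recursive mirror of Source B's running minimum, for reasoning about the fold
def pvBestR (t : String) (g : List String) : List String → Option (Nat × String)
  | [] => none
  | x :: xs =>
    match pvB_rank t g (normalize_layout_name x), pvBestR t g xs with
    | none, b => b
    | some r, none => some (r, x)
    | some r, some (r', x') => if r' < r then some (r', x') else some (r, x)

def pvMerge (a b : Option (Nat × String)) : Option (Nat × String) :=
  match b with
  | none => a
  | some (r, _) =>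
    match a with
    | none => b
    | some (ra, _) => if r < ra then b else a

lemma foldl_eq_merge (t : String) (g : List String) (xs : List String) :
    ∀ acc, xs.foldl (pvB_step t g) acc = pvMerge acc (pvBestR t g xs) := by
  induction xs with
  | nil => intro acc; cases acc <;> rfl
  | cons x xs ih =>
    intro acc
    rw [List.foldl_cons, ih]
    cases hr : pvB_rank t g (normalize_layout_name x) with
    | none => simp only [pvB_step, hr, pvBestR]
    | some r =>
      cases hb : pvBestR t g xs with
      | none =>
        simp only [pvB_step, hr, pvBestR, hb]
        cases acc with
        | none => rfl
        | some p =>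
          obtain ⟨ra, a⟩ := p
          rfl
      | some q =>
        obtain ⟨r', x'⟩ := q
        simp only [pvB_step, hr, pvBestR, hb]
        cases acc with
        | none =>
          simp only [pvMerge]
          split_ifs <;> rfl
        | some p =>
          obtain ⟨ra, a⟩ := p
          dsimp only [pvMerge]
          split_ifs <;>
            first
              | rfl
              | omega
              | (dsimp only [pvMerge]; split_ifs <;> first | rfl | omega)

lemma bestR_none (t : String) (g : List String) (xs : List String)
    (h : pvBestR t g xs = none) :
    ∀ x ∈ xs, pvB_rank t g (normalize_layout_name x) = none := by
  induction xs with
  | nil => intro x hx; cases hx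
  | cons x xs ih =>
    intro y hy
    rw [pvBestR] at h
    cases hr : pvB_rank t g (normalize_layout_name x) with
    | some r =>
      rw [hr] at h
      cases hb : pvBestR t g xs with
      | none => simp [hb] at h
      | some q => rw [hb] at h; dsimp only at h; split_ifs at h
    | none =>
      rw [hr] at h
      rcases List.mem_cons.mp hy with rfl | hy'
      · exact hr
      · exact ih h y hy'

lemma bestR_some (t : String) (g : List String) (xs : List String) (r : Nat) (x : String)
    (h : pvBestR t g xs = some (r, x)) :
    ∃ l1 l2, xs = l1 ++ x :: l2 ∧ pvB_rank t g (normalize_layout_name x) = some r ∧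
      (∀ y ∈ l1, ∀ ry, pvB_rank t g (normalize_layout_name y) = some ry → r < ry) ∧
      (∀ y ∈ xs, ∀ ry, pvB_rank t g (normalize_layout_name y) = some ry → r ≤ ry) := by
  induction xs generalizing r x with
  | nil => cases h
  | cons a xs ih =>
    rw [pvBestR] at h
    cases hr : pvB_rank t g (normalize_layout_name a) with
    | none =>
      rw [hr] at h
      obtain ⟨l1, l2, heq, hrx, hl1, hmin⟩ := ih r x h
      exact ⟨a :: l1, l2, by rw [heq]; rfl, hrx,
        fun y hy ry hry => by
          rcases List.mem_cons.mp hy with rfl | hy'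
          · rw [hr] at hry; cases hry
          · exact hl1 y hy' ry hry,
        fun y hy ry hry => by
          rcases List.mem_cons.mp hy with rfl | hy'
          · rw [hr] at hry; cases hry
          · exact hmin y hy' ry hry⟩
    | some r0 =>
      rw [hr] at h
      cases hb : pvBestR t g xs with
      | none =>
        rw [hb] at h
        obtain ⟨rfl, rfl⟩ : r0 = r ∧ a = x := by
          simpa using h
        have hall := bestR_none t g xs hb
        exact ⟨[], xs, rfl, hr, fun y hy => (List.not_mem_nil hy).elim,
          fun y hy ry hry => by
            rcases List.mem_cons.mp hy with rfl | hy'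
            · rw [hr] at hry; injection hry with h'; omega
            · rw [hall y hy'] at hry; cases hry⟩
      | some q =>
        obtain ⟨r', x'⟩ := q
        rw [hb] at h
        dsimp only at h
        by_cases hlt : r' < r0
        · rw [if_pos hlt] at h
          obtain ⟨rfl, rfl⟩ : r' = r ∧ x' = x := by simpa using h
          obtain ⟨l1, l2, heq, hrx, hl1, hmin⟩ := ih _ _ hb
          exact ⟨a :: l1, l2, by rw [heq]; rfl, hrx,
            fun y hy ry hry => by
              rcases List.mem_cons.mp hy with rfl | hy'
              · rw [hr] at hry; injection hry with h'; omega
              · exact hl1 y hy' ry hry,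
            fun y hy ry hry => by
              rcases List.mem_cons.mp hy with rfl | hy'
              · rw [hr] at hry; injection hry with h'; omega
              · exact hmin y hy' ry hry⟩
        · rw [if_neg hlt] at h
          obtain ⟨rfl, rfl⟩ : r0 = r ∧ a = x := by simpa using h
          obtain ⟨-, -, -, -, -, hmin⟩ := ih r' x' hb
          exact ⟨[], xs, rfl, hr, fun y hy => (List.not_mem_nil hy).elim,
            fun y hy ry hry => by
              rcases List.mem_cons.mp hy with rfl | hy'
              · rw [hr] at hry; injection hry with h'; omega
              · have := hmin y hy' ry hry; omega⟩

-- find? characterized by the first position satisfying the predicate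
lemma find?_of_first_pos (p : String → Bool) (l : List String) (r : Nat) (c : String)
    (hat? : l[r]? = some c)
    (hbefore : ∀ j, j < r → ∀ cj, l[j]? = some cj → p cj = false)
    (hat : p c = true) :
    l.find? p = some c := by
  induction l generalizing r with
  | nil => cases hat?
  | cons a l ih =>
    cases r with
    | zero =>
      obtain rfl : a = c := by simpa using hat?
      rw [List.find?_cons_of_pos hat]
    | succ r =>
      have ha : p a = false := hbefore 0 (Nat.succ_pos r) a rfl
      rw [List.find?_cons_of_neg (by simp [ha])]
      exact ih r (by simpa using hat?) (fun j hj cj hcj => hbefore (j + 1) (by omega) cj (by simpa using hcj))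

-- B equals the candidate scan over (target :: target's group)
lemma B_eq_candScan (target : String) (available : List String) :
    find_compatible_layout_alt target available =
      pvCandScan (normalize_layout_name target :: pvB_group (normalize_layout_name target))
        (available.map normalize_layout_name) available := by
  unfold find_compatible_layout_alt
  set t := normalize_layout_name target
  set g := pvB_group t
  set cands := t :: g with hcands
  set an := available.map normalize_layout_name with han
  show (match available.foldl (pvB_step t g) none with
        | some (_, x) => some x
        | none => none) = pvCandScan cands an available
  rw [foldl_eq_merge]
  have hrank : ∀ n, pvB_rank t g n = PySem.List.index? cands n := fun n => rank_eq_index t g n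
  cases hb : pvBestR t g available with
  | none =>
    -- nothing in available has its normalized name among the candidates
    have hall := bestR_none t g available hb
    have hfind : cands.find? (fun c => an.contains c) = none := by
      rw [List.find?_eq_none]
      intro c hc hmem
      have : c ∈ an := by simpa using hmem
      rw [han] at this
      obtain ⟨x, hx, rfl⟩ := List.mem_map.mp this
      have := hall x hx
      rw [hrank] at this
      exact absurd hc ((PySem.List.index?_eq_none_iff _ _).mp this)
    rw [pvCandScan, hfind]; rfl
  | some p =>
    obtain ⟨r, x⟩ := p
    obtain ⟨l1, l2, heq, hrx, hl1, hmin⟩ := bestR_some t g available r x hb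
    rw [hrank] at hrx
    obtain ⟨hrlen, hcr, hbef⟩ := PySem.List.getElem_of_index?_eq_some hrx
    have hxav : x ∈ available := by rw [heq]; simp
    have hxan : an.contains (normalize_layout_name x) = true := by
      have : normalize_layout_name x ∈ an := by
        rw [han]; exact List.mem_map.mpr ⟨x, hxav, rfl⟩
      simpa using this
    have hat? : cands[r]? = some (normalize_layout_name x) := by
      rw [List.getElem?_eq_getElem hrlen, hcr]
    -- find? returns the candidate at position r, which is normalize x
    have hfind : cands.find? (fun c => an.contains c) = some (normalize_layout_name x) := by
      apply find?_of_first_pos _ _ r _ hat? _ hxan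
      intro j hj cj hcj
      have hjlen : j < cands.length := (List.getElem?_eq_some_iff.mp hcj).1
      have hcjv : cands[j]'hjlen = cj := (List.getElem?_eq_some_iff.mp hcj).2
      by_contra hcj'
      have hmem : cj ∈ an := by
        cases h' : an.contains cj
        · exact absurd h' hcj'
        · simpa using h'
      rw [han] at hmem
      obtain ⟨y, hy, hny⟩ := List.mem_map.mp hmem
      -- rank of y is its first index in cands, which is ≤ j < r
      have hymem : normalize_layout_name y ∈ cands := by
        rw [hny, ← hcjv]; exact List.getElem_mem _
      obtain ⟨ry, hry⟩ := Option.isSome_iff_exists.mp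
        ((PySem.List.index?_isSome_iff _ _).mpr hymem)
      have hge : r ≤ ry := by
        apply hmin y hy ry
        rw [hrank]; exact hry
      obtain ⟨hrylen, hcy, hbefy⟩ := PySem.List.getElem_of_index?_eq_some hry
      -- first occurrence index ry is ≤ j since cands[j] = normalize y
      have hle : ry ≤ j := by
        by_contra hgt
        exact hbefy j (by omega) (by rw [hcjv, hny])
      omega
    rw [pvCandScan, hfind]
    dsimp only [pvMerge]
    -- first index of (normalize x) in an is l1.length, and available there is x
    have hnotin : normalize_layout_name x ∉ l1.map normalize_layout_name := by
      intro hmem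
      obtain ⟨y, hy, hny⟩ := List.mem_map.mp hmem
      have := hl1 y hy r (by rw [hrank, hny]; exact hrx)
      omega
    have hidx : PySem.List.index? an (normalize_layout_name x) = some l1.length := by
      rw [PySem.List.index?_eq_some_iff]
      exact ⟨l1.map normalize_layout_name, l2.map normalize_layout_name,
        by rw [han, heq]; simp, by simp, hnotin⟩
    rw [hidx]
    have hgetx : available[l1.length]? = some x := by
      rw [heq, List.getElem?_append_right (le_refl _)]
      simp
    simp [hgetx]

-- ===== VERDICT (by name: the statement is the Claim_ definition above) =====
theorem find_compatible_layout_spec : Claim_equal_find_compatible_layout := by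
  intro target available _
  unfold Spec_find_compatible_layout
  rw [A_eq_candScan, B_eq_candScan]
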